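-- pv_equiv track=rewrite | github.com/AGolobokov/epamRepo | homework2/tasks/hw2.py | major_and_minor_elem
-- ===== SOURCE A (Python) =====
-- from typing import List, Tuple
--
-- def major_and_minor_elem(inp: List) -> Tuple[int, int]:
--     temp_dict = dict()
--     for i in inp:
--         if i not in temp_dict:
--             counter_value = 0
--             temp_dict.update({i: counter_value})
--         else:
--             for key, value in temp_dict.items():
--                 if key == i:
--                     value = value + 1
--                     temp_dict.update({i: value})
--     max_value = max([value for value in temp_dict.values()])
--     min_value = min([value for value in temp_dict.values()])
--
--     most_common = least_common = 0
--     for key, value in temp_dict.items():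
--         if value == max_value:
--             most_common = key
--         if value == min_value:
--             least_common = key
--     answer = (most_common, least_common)
--     return answer
-- ===== SOURCE B (Python) =====
-- from typing import List, Tuple
--
-- def major_and_minor_elem(inp: List) -> Tuple[int, int]:
--     counts = {}
--     for x in inp:
--         counts[x] = counts.get(x, 0) + 1
--     most_common = least_common = 0
--     best_max = -1
--     best_min = len(inp) + 1
--     for k, c in counts.items():
--         if best_max <= c:
--             most_common, best_max = k, c
--         if c <= best_min:
--             least_common, best_min = k, c
--     return (most_common, least_common)
-- ===== Notes on version B (the rewrite author's own statement) =====
-- stated objective: faster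
-- what changed: A's quadratic inner scan of dict.items() per repeated element is replaced by a single counting pass (dict.get+1) and A's separate max()/min() passes plus a third scan are fused into one running-max/running-min scan over the counts.
import Mathlib
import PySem

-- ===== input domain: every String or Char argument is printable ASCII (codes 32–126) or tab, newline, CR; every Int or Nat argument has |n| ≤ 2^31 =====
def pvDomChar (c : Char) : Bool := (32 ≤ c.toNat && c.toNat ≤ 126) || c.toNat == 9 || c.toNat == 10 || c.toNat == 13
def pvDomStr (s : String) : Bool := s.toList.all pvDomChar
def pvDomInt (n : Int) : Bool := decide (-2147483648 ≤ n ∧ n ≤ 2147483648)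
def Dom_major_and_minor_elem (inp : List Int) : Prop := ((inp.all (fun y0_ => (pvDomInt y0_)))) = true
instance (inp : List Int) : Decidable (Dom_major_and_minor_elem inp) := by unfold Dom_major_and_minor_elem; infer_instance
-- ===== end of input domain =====

-- B replaces A's per-element scan of dict.items() by one dict.get-based counting pass and fuses
-- A's max()/min() passes and final scan into a single running-max/running-min scan (objective: faster).

-- ===== PORT A =====
-- A's inner `for key, value in temp_dict.items()` loop body (updating the snapshot's matching key)
def pvStepAInner (i : Int) (d : PySem.Dict Int Int) (kv : Int × Int) : PySem.Dict Int Int :=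
  if kv.1 == i then d.insert i (kv.2 + 1) else d

-- A's outer `for i in inp` loop body
def pvStepA (d : PySem.Dict Int Int) (i : Int) : PySem.Dict Int Int :=
  if !(d.contains i) then d.insert i 0
  else d.items.foldl (pvStepAInner i) d

-- A's final `for key, value in temp_dict.items()` loop body (state = (most_common, least_common))
def pvScanA (maxv minv : Int) (ml : Int × Int) (kv : Int × Int) : Int × Int :=
  (if kv.2 = maxv then kv.1 else ml.1, if kv.2 = minv then kv.1 else ml.2)

def major_and_minor_elem (inp : List Int) : Int × Int :=
  let temp_dict := inp.foldl pvStepA PySem.Dict.empty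
  -- max()/min() of an empty list raise ValueError in Python; `.getD 0` is reached only outside Pre_
  let max_value := (PySem.List.max? (temp_dict.values.map (fun value => value)) (fun y => y)).getD 0
  let min_value := (PySem.List.min? (temp_dict.values.map (fun value => value)) (fun y => y)).getD 0
  temp_dict.items.foldl (pvScanA max_value min_value) (0, 0)

-- ===== PORT B =====
-- B's scan body; state = (most_common, least_common, best_max, best_min)
def pvStepB (s : Int × Int × Int × Int) (kv : Int × Int) : Int × Int × Int × Int :=
  let s1 := if s.2.2.1 ≤ kv.2 then (kv.1, s.2.1, kv.2, s.2.2.2) else s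
  if kv.2 ≤ s1.2.2.2 then (s1.1, kv.1, s1.2.2.1, kv.2) else s1

def major_and_minor_elem_alt (inp : List Int) : Int × Int :=
  let counts := inp.foldl (fun d x => d.insert x (d.getD x 0 + 1)) PySem.Dict.empty
  let s := counts.items.foldl pvStepB (0, 0, -1, PySem.List.len inp + 1)
  (s.1, s.2.1)

-- ===== PRECONDITION & SPEC =====
-- Pre_ excludes only the empty list, on which A raises ValueError (max() of an empty sequence).
def Pre_major_and_minor_elem (inp : List Int) : Prop := inp ≠ []
instance (inp : List Int) : Decidable (Pre_major_and_minor_elem inp) := by unfold Pre_major_and_minor_elem; infer_instance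
def pvWitness_major_and_minor_elem : List Int := ([1, 2, 2])

def Spec_major_and_minor_elem (inp : List Int) (out : Int × Int) : Prop := out = major_and_minor_elem_alt inp
instance (inp : List Int) (out : Int × Int) : Decidable (Spec_major_and_minor_elem inp out) := by unfold Spec_major_and_minor_elem; infer_instance

-- ===== CLAIM (what is proved, stated in full; the proofs are below) =====
def Claim_equal_major_and_minor_elem : Prop := ∀ (inp : List Int), Dom_major_and_minor_elem inp → Pre_major_and_minor_elem inp → Spec_major_and_minor_elem inp (major_and_minor_elem inp)

-- ===== LEMMAS AND PROOFS =====

lemma pvInner_no_match (i : Int) (l : List (Int × Int)) (s : PySem.Dict Int Int)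
    (h : ∀ p ∈ l, p.1 ≠ i) :
    l.foldl (pvStepAInner i) s = s := by
  induction l generalizing s with
  | nil => rfl
  | cons p t ih =>
    simp only [List.foldl_cons]
    rw [show pvStepAInner i s p = s by
      simp [pvStepAInner, h p (by simp)]]
    exact ih s (fun q hq => h q (by simp [hq]))

lemma pvInner_eq (x : Int) (S : List Int) (c : Int → Int) (s : PySem.Dict Int Int)
    (hnd : S.Nodup) (hx : x ∈ S) :
    ((S.map (fun k => (k, c k))).foldl (pvStepAInner x) s = s.insert x (c x + 1)) := by
  obtain ⟨S1, S2, rfl⟩ := List.append_of_mem hx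
  have hnd' : S1.Nodup ∧ (x :: S2).Nodup ∧ ∀ a ∈ S1, ∀ b ∈ x :: S2, a ≠ b := by
    rw [← List.nodup_append]; exact hnd
  have h1 : x ∉ S1 := fun h => hnd'.2.2 x h x (by simp) rfl
  have h2 : x ∉ S2 := (List.nodup_cons.mp hnd'.2.1).1
  have hno : ∀ (T : List Int), x ∉ T → ∀ p ∈ T.map (fun k => (k, c k)), p.1 ≠ x := by
    intro T hT p hp
    obtain ⟨k, hk, he⟩ := List.mem_map.mp hp
    cases he
    exact fun he2 => hT (he2 ▸ hk)
  rw [List.map_append, List.foldl_append, pvInner_no_match x _ s (hno S1 h1),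
      List.map_cons, List.foldl_cons,
      show pvStepAInner x s (x, c x) = s.insert x (c x + 1) by simp [pvStepAInner]]
  exact pvInner_no_match x _ _ (hno S2 h2)
lemma pvBuildA_items (l : List Int) :
    (l.foldl pvStepA PySem.Dict.empty).items
      = (PySem.Set.ofList l).map (fun k => (k, (l.count k : Int) - 1)) := by
  induction l using List.reverseRecOn with
  | nil => rfl
  | append_singleton l x ih =>
    rw [List.foldl_append, List.foldl_cons, List.foldl_nil]
    have hkeys : (l.foldl pvStepA PySem.Dict.empty).keys = PySem.Set.ofList l := by
      simp only [PySem.Dict.keys, ih, List.map_map]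
      exact (List.map_congr_left (fun k _ => rfl)).trans (List.map_id _)
    have hofl : PySem.Set.ofList (l ++ [x])
        = if x ∈ l then PySem.Set.ofList l else PySem.Set.ofList l ++ [x] := by
      simp only [PySem.Set.ofList, List.foldl_append, List.foldl_cons, List.foldl_nil]
      by_cases hx : x ∈ l
      · rw [if_pos hx]
        exact PySem.Set.add_of_mem ((PySem.Set.mem_ofList l x).mpr hx)
      · rw [if_neg hx]
        have hc : (List.foldl PySem.Set.add PySem.Set.empty l).contains x = false := by
          rw [PySem.Set.contains_eq_listContains]
          simp only [List.contains_eq_mem, decide_eq_false_iff_not]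
          exact fun h => hx ((PySem.Set.mem_ofList l x).mp h)
        simp only [PySem.Set.add, PySem.Set.empty] at hc ⊢
        rw [hc]
        simp
    have hcnt_ne : ∀ k, k ≠ x → ((l ++ [x]).count k : Int) = (l.count k : Int) := by
      intro k hk
      rw [List.count_append]
      have h0 : List.count k [x] = 0 := by
        simp only [List.count_singleton]
        exact if_neg (fun h => hk (beq_iff_eq.mp h).symm)
      rw [h0]
      simp
    have hcnt_x : ((l ++ [x]).count x : Int) = (l.count x : Int) + 1 := by
      rw [List.count_append]; simp
    have hcontains : (l.foldl pvStepA PySem.Dict.empty).contains x = decide (x ∈ l) := by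
      rw [PySem.Dict.contains_eq_decide_mem_keys, hkeys]
      simp [PySem.Set.mem_ofList]
    by_cases hx : x ∈ l
    · rw [show pvStepA (l.foldl pvStepA PySem.Dict.empty) x
          = (l.foldl pvStepA PySem.Dict.empty).insert x (((l.count x : Int) - 1) + 1) by
        rw [pvStepA, hcontains]
        simp only [hx, decide_true, Bool.not_true, Bool.false_eq_true, if_false]
        rw [ih]
        exact pvInner_eq x _ _ _ (PySem.Set.nodup_ofList l) ((PySem.Set.mem_ofList l x).mpr hx)]
      rw [PySem.Dict.items_insert_of_contains _ _ (by rw [hcontains]; simp [hx]), ih,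
          List.map_map, hofl, if_pos hx]
      apply List.map_congr_left
      intro k hk
      simp only [Function.comp_apply]
      by_cases hkx : k = x
      · subst hkx
        simp only [beq_self_eq_true, if_true, Prod.mk.injEq, true_and]
        rw [hcnt_x]
        omega
      · have hb : (k == x) = false := by simp [hkx]
        simp only [hb, Bool.false_eq_true, if_false, Prod.mk.injEq, true_and]
        rw [hcnt_ne k hkx]
    · rw [show pvStepA (l.foldl pvStepA PySem.Dict.empty) x
          = (l.foldl pvStepA PySem.Dict.empty).insert x 0 by
        rw [pvStepA, hcontains]; simp [hx]]
      rw [PySem.Dict.items_insert_of_not_contains _ _ (by rw [hcontains]; simp [hx]), ih,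
          hofl, if_neg hx, List.map_append]
      congr 1
      · apply List.map_congr_left
        intro k hk
        have hkx : k ≠ x := fun he => hx (he ▸ (PySem.Set.mem_ofList l k).mp hk)
        rw [hcnt_ne k hkx]
      · simp [List.count_append, List.count_eq_zero_of_not_mem hx]
lemma pvScan_main (S : List Int) (c : Int → Int) (maxv minv : Int) :
    ∀ (mA lA mB lB bmax bmin : Int),
    (∀ k ∈ S, c k - 1 ≤ maxv) → (∀ k ∈ S, minv ≤ c k - 1) →
    bmax ≤ maxv + 1 → minv + 1 ≤ bmin →
    ((∃ k ∈ S, c k - 1 = maxv) ∨ (bmax = maxv + 1 ∧ mA = mB)) →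
    ((∃ k ∈ S, c k - 1 = minv) ∨ (bmin = minv + 1 ∧ lA = lB)) →
    (S.foldl (fun ml k => pvScanA maxv minv ml (k, c k - 1)) (mA, lA))
      = (let s := S.foldl (fun s k => pvStepB s (k, c k)) (mB, lB, bmax, bmin); (s.1, s.2.1)) := by
  induction S with
  | nil =>
    intro mA lA mB lB bmax bmin _ _ _ _ hM hm
    obtain ⟨_, h1⟩ := hM.resolve_left (by simp)
    obtain ⟨_, h2⟩ := hm.resolve_left (by simp)
    simp [h1, h2]
  | cons k T ih =>
    intro mA lA mB lB bmax bmin hmax hmin hbmax hbmin hM hm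
    have hck_max : c k - 1 ≤ maxv := hmax k (by simp)
    have hck_min : minv ≤ c k - 1 := hmin k (by simp)
    simp only [List.foldl_cons]
    have hstep : pvStepB (mB, lB, bmax, bmin) (k, c k)
        = (if bmax ≤ c k then k else mB, if c k ≤ bmin then k else lB,
           if bmax ≤ c k then c k else bmax, if c k ≤ bmin then c k else bmin) := by
      simp only [pvStepB]
      by_cases h1 : bmax ≤ c k <;> by_cases h2 : c k ≤ bmin <;> simp [h1, h2]
    have hstepA : pvScanA maxv minv (mA, lA) (k, c k - 1)
        = (if c k - 1 = maxv then k else mA, if c k - 1 = minv then k else lA) := rfl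
    rw [hstep, hstepA]
    by_cases h1 : bmax ≤ c k <;> by_cases h2 : c k ≤ bmin <;>
      simp only [h1, h2, if_true, if_false] <;>
      [skip; skip; skip; skip] <;>
    · refine ih _ _ _ _ _ _ (fun j hj => hmax j (by simp [hj])) (fun j hj => hmin j (by simp [hj]))
        (by omega) (by omega) ?_ ?_
      · by_cases hk : c k - 1 = maxv
        · exact Or.inr ⟨by omega, by rw [if_pos hk]; try omega⟩
        · simp only [hk, if_false]
          rcases hM with ⟨j, hj, hcj⟩ | ⟨hb, hmb⟩
          · rcases List.mem_cons.mp hj with rfl | hjT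
            · exact absurd hcj hk
            · exact Or.inl ⟨j, hjT, hcj⟩
          · first
            | (exfalso; omega)
            | exact Or.inr ⟨hb, hmb⟩
      · by_cases hk : c k - 1 = minv
        · exact Or.inr ⟨by omega, by rw [if_pos hk]; try omega⟩
        · simp only [hk, if_false]
          rcases hm with ⟨j, hj, hcj⟩ | ⟨hb, hlb⟩
          · rcases List.mem_cons.mp hj with rfl | hjT
            · exact absurd hcj hk
            · exact Or.inl ⟨j, hjT, hcj⟩
          · first
            | (exfalso; omega)
            | exact Or.inr ⟨hb, hlb⟩
lemma pvMain (inp : List Int) (hpre : inp ≠ []) :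
    major_and_minor_elem inp = major_and_minor_elem_alt inp := by
  unfold major_and_minor_elem major_and_minor_elem_alt
  dsimp only []
  rw [PySem.Dict.foldl_insert_getD_add_one_eq_counter]
  have hitems := pvBuildA_items inp
  have hvals : (inp.foldl pvStepA PySem.Dict.empty).values.map (fun value => value)
      = (PySem.Set.ofList inp).map (fun k => ((inp.count k : Int) - 1)) := by
    simp [PySem.Dict.values, hitems, List.map_map]
  have hSne : PySem.Set.ofList inp ≠ [] := by
    obtain ⟨a, t, rfl⟩ := List.exists_cons_of_ne_nil hpre
    exact List.ne_nil_of_mem ((PySem.Set.mem_ofList _ a).mpr (by simp))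
  have hvne : (PySem.Set.ofList inp).map (fun k => ((inp.count k : Int) - 1)) ≠ [] := by
    simpa using hSne
  obtain ⟨M, hM⟩ : ∃ M, PySem.List.max? ((PySem.Set.ofList inp).map (fun k => ((inp.count k : Int) - 1))) (fun y => y) = some M := by
    cases hEq : PySem.List.max? ((PySem.Set.ofList inp).map (fun k => ((inp.count k : Int) - 1))) (fun y => y) with
    | none => exact absurd ((PySem.List.max?_eq_none_iff _ _).mp hEq) hvne
    | some M => exact ⟨M, rfl⟩
  obtain ⟨m, hm⟩ : ∃ m, PySem.List.min? ((PySem.Set.ofList inp).map (fun k => ((inp.count k : Int) - 1))) (fun y => y) = some m := by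
    cases hEq : PySem.List.min? ((PySem.Set.ofList inp).map (fun k => ((inp.count k : Int) - 1))) (fun y => y) with
    | none => exact absurd ((PySem.List.min?_eq_none_iff _ _).mp hEq) hvne
    | some m => exact ⟨m, rfl⟩
  have hcount1 : ∀ k ∈ PySem.Set.ofList inp, 1 ≤ inp.count k := by
    intro k hk
    exact List.one_le_count_iff.mpr ((PySem.Set.mem_ofList _ k).mp hk)
  have hcountlen : ∀ k, inp.count k ≤ inp.length := fun k => List.count_le_length ..
  obtain ⟨kM, hkM, hkMv⟩ : ∃ k ∈ PySem.Set.ofList inp, (inp.count k : Int) - 1 = M := by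
    obtain ⟨k, hk, he⟩ := List.mem_map.mp (PySem.List.max?_mem hM)
    exact ⟨k, hk, he⟩
  obtain ⟨km, hkm, hkmv⟩ : ∃ k ∈ PySem.Set.ofList inp, (inp.count k : Int) - 1 = m := by
    obtain ⟨k, hk, he⟩ := List.mem_map.mp (PySem.List.min?_mem hm)
    exact ⟨k, hk, he⟩
  have hmaxall : ∀ k ∈ PySem.Set.ofList inp, (inp.count k : Int) - 1 ≤ M := by
    intro k hk
    exact PySem.List.max?_isMax hM _ (List.mem_map.mpr ⟨k, hk, rfl⟩)
  have hminall : ∀ k ∈ PySem.Set.ofList inp, m ≤ (inp.count k : Int) - 1 := by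
    intro k hk
    exact PySem.List.min?_isMin hm _ (List.mem_map.mpr ⟨k, hk, rfl⟩)
  rw [hvals, hM, hm, hitems, PySem.Dict.items_counter, List.foldl_map, List.foldl_map,
      PySem.List.len_eq]
  simp only [Option.getD_some]
  exact pvScan_main (PySem.Set.ofList inp) (fun k => (inp.count k : Int)) M m 0 0 0 0 (-1)
    ((inp.length : Int) + 1) hmaxall hminall
    (by have := hcount1 kM hkM; omega)
    (by have := hcountlen km; have := hcount1 km hkm; omega)
    (Or.inl ⟨kM, hkM, hkMv⟩) (Or.inl ⟨km, hkm, hkmv⟩)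

-- ===== VERDICT (by name: the statement is the Claim_ definition above) =====
theorem major_and_minor_elem_spec : Claim_equal_major_and_minor_elem := by
  intro inp _ hpre
  unfold Spec_major_and_minor_elem
  exact pvMain inp hpre
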